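-- pv_equiv track=rewrite | github.com/RussellDash332/kattis | src/Stol/stol.py | max_perimeter
-- ===== SOURCE A (Python) =====
-- def max_perimeter(h):
--     stack = []
--     idx = 0
--     result = 0
--     while idx < len(h):
--         if not stack or h[stack[-1]] <= h[idx]:
--             stack.append(idx)
--             idx += 1
--         else:
--             top = stack.pop()
--             if stack and h[top] != 0:
--                 result = max(result, 2 * (h[top] + (idx - stack[-1] - 1)) * int(h[top] != 0))
--             else:
--                 result = max(result, 2 * (h[top] + idx) * int(h[top] != 0))
--     while stack:
--         top = stack.pop()
--         if stack:
--             result = max(result, 2 * (h[top] + (idx - stack[-1] - 1)) * int(h[top] != 0))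
--         else:
--             result = max(result, 2 * (h[top] + idx) * int(h[top] != 0))
--     return result
-- ===== SOURCE B (Python) =====
-- def max_perimeter(h):
--     n = len(h)
--     best = 0
--     for i in range(n):
--         if h[i] == 0:
--             continue
--         l = i
--         while l > 0 and h[l-1] > h[i]:
--             l -= 1
--         r = i
--         while r + 1 < n and h[r+1] >= h[i]:
--             r += 1
--         best = max(best, 2 * (h[i] + (r - l + 1)))
--     return best
-- ===== Notes on version B (the rewrite author's own statement) =====
-- stated objective: simpler
-- what changed: Replaces A's interleaved monotonic-stack push/pop loop (with separate drain loop and stack-dependent width cases) by a direct per-bar computation: for each nonzero bar scan left while bars are strictly taller and right while bars are at least as tall, and take the max of 2*(height+width).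
import Mathlib
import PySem

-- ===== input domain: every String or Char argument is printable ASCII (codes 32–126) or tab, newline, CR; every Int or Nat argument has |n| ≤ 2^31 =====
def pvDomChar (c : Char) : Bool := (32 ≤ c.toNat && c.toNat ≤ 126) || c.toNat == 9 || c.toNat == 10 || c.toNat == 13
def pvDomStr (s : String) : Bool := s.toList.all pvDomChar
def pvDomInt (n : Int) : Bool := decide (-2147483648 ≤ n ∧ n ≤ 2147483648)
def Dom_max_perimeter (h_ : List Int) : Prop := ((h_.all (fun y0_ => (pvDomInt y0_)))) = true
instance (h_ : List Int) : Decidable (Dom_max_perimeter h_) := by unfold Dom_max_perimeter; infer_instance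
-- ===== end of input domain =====

-- B replaces A's interleaved monotonic-stack push/pop loop with a per-bar brute-force scan
-- (nearest smaller bar to each side), a simpler formulation of the same maximum.

-- ===== PORT A =====
-- all list accesses of A are in range during execution, so getD is exact here
def pvH (h : List Int) (i : Nat) : Int := h.getD i 0

-- first while loop of A; returns the stack and result when idx reaches len(h)
def pvLoop1 (h : List Int) (stack : List Nat) (idx : Nat) (result : Int) : List Nat × Int :=
  if hidx : idx < h.length then
    match stack with
    | [] => pvLoop1 h [idx] (idx + 1) result
    | top :: rest =>
      if pvH h top ≤ pvH h idx then
        pvLoop1 h (idx :: top :: rest) (idx + 1) result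
      else
        let result' :=
          match rest with
          | r :: _ =>
            if pvH h top ≠ 0 then
              max result (2 * (pvH h top + ((idx : Int) - (r : Int) - 1)) * (if pvH h top ≠ 0 then 1 else 0))
            else
              max result (2 * (pvH h top + (idx : Int)) * (if pvH h top ≠ 0 then 1 else 0))
          | [] => max result (2 * (pvH h top + (idx : Int)) * (if pvH h top ≠ 0 then 1 else 0))
        pvLoop1 h rest idx result'
  else (stack, result)
termination_by 2 * (h.length - idx) + stack.length
decreasing_by all_goals (simp only [List.length_cons, List.length_nil]; omega)

-- second while loop of A (idx = len(h) there)
def pvLoop2 (h : List Int) (stack : List Nat) (result : Int) : Int :=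
  match stack with
  | [] => result
  | top :: rest =>
    let result' :=
      match rest with
      | r :: _ => max result (2 * (pvH h top + ((h.length : Int) - (r : Int) - 1)) * (if pvH h top ≠ 0 then 1 else 0))
      | [] => max result (2 * (pvH h top + (h.length : Int)) * (if pvH h top ≠ 0 then 1 else 0))
    pvLoop2 h rest result'

def max_perimeter (h_ : List Int) : Int :=
  let p := pvLoop1 h_ [] 0 0
  pvLoop2 h_ p.1 p.2

-- ===== PORT B =====
-- while l > 0 and h[l-1] > hi: l -= 1
def pvScanL (h : List Int) (hi : Int) (l : Nat) : Nat :=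
  if 0 < l ∧ hi < h.getD (l - 1) 0 then pvScanL h hi (l - 1) else l
termination_by l
decreasing_by omega

-- while r+1 < n and h[r+1] >= hi: r += 1
def pvScanR (h : List Int) (hi : Int) (r : Nat) : Nat :=
  if r + 1 < h.length ∧ hi ≤ h.getD (r + 1) 0 then pvScanR h hi (r + 1) else r
termination_by h.length - r
decreasing_by omega

def max_perimeter_alt (h_ : List Int) : Int :=
  (List.range h_.length).foldl (fun best i =>
    let hi := h_.getD i 0
    if hi = 0 then best
    else
      let l := pvScanL h_ hi i
      let r := pvScanR h_ hi i
      max best (2 * (hi + ((r : Int) - (l : Int) + 1)))) 0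

-- ===== PRECONDITION & SPEC =====
def Spec_max_perimeter (h_ : List Int) (out : Int) : Prop := out = max_perimeter_alt h_
instance (h_ : List Int) (out : Int) : Decidable (Spec_max_perimeter h_ out) := by unfold Spec_max_perimeter; infer_instance

-- ===== CLAIM (what is proved, stated in full; the proofs are below) =====
def Claim_equal_max_perimeter : Prop := ∀ (h_ : List Int), Dom_max_perimeter h_ → Spec_max_perimeter h_ (max_perimeter h_)

-- ===== LEMMAS AND PROOFS =====

-- the contribution of bar j, expressed through B's scan helpers
def pvVal (h : List Int) (j : Nat) : Int :=
  if pvH h j = 0 then 0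
  else 2 * (pvH h j + ((pvScanR h (pvH h j) j : Int) - (pvScanL h (pvH h j) j : Int) + 1))

-- "r is the maximum of 0 and the pvVal of all bars in S"
def pvP (h : List Int) (S : Nat → Prop) (r : Int) : Prop :=
  0 ≤ r ∧ (∀ j, S j → pvVal h j ≤ r) ∧ (r = 0 ∨ ∃ j, S j ∧ r = pvVal h j)

lemma pvP_unique {h : List Int} {S : Nat → Prop} {r1 r2 : Int}
    (h1 : pvP h S r1) (h2 : pvP h S r2) : r1 = r2 := by
  obtain ⟨n1, u1, w1⟩ := h1
  obtain ⟨n2, u2, w2⟩ := h2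
  apply le_antisymm
  · rcases w1 with h | ⟨j, hj, rfl⟩
    · omega
    · exact u2 j hj
  · rcases w2 with h | ⟨j, hj, rfl⟩
    · omega
    · exact u1 j hj

lemma pvP_congr {h : List Int} {S T : Nat → Prop} {r : Int}
    (hST : ∀ j, S j ↔ T j) (hp : pvP h S r) : pvP h T r := by
  obtain ⟨n1, u1, w1⟩ := hp
  refine ⟨n1, fun j hj => u1 j ((hST j).2 hj), ?_⟩
  rcases w1 with h | ⟨j, hj, rfl⟩
  · exact Or.inl h
  · exact Or.inr ⟨j, (hST j).1 hj, rfl⟩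

lemma pvP_insert {h : List Int} {S T : Nat → Prop} {r : Int} {k : Nat}
    (hp : pvP h S r) (hST : ∀ j, T j ↔ (S j ∨ j = k)) :
    pvP h T (max r (pvVal h k)) := by
  obtain ⟨n1, u1, w1⟩ := hp
  refine ⟨le_trans n1 (le_max_left _ _), ?_, ?_⟩
  · intro j hj
    rcases (hST j).1 hj with hj | rfl
    · exact le_trans (u1 j hj) (le_max_left _ _)
    · exact le_max_right _ _
  · rcases le_total (pvVal h k) r with hle | hle
    · rw [max_eq_left hle]
      rcases w1 with h0 | ⟨j, hj, rfl⟩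
      · exact Or.inl h0
      · exact Or.inr ⟨j, (hST j).2 (Or.inl hj), rfl⟩
    · rw [max_eq_right hle]
      exact Or.inr ⟨k, (hST k).2 (Or.inr rfl), rfl⟩

-- scanL characterization
lemma pvScanL_eq (h : List Int) (hi : Int) (l : Nat)
    (hstop : l = 0 ∨ h.getD (l - 1) 0 ≤ hi) :
    ∀ s, l ≤ s → (∀ m, l ≤ m → m < s → hi < h.getD m 0) → pvScanL h hi s = l := by
  intro s
  induction s with
  | zero =>
    intro hls _
    have : l = 0 := by omega
    subst this
    rw [pvScanL]; simp
  | succ s ih =>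
    intro hls hcond
    rcases Nat.lt_or_ge l (s + 1) with hlt | hge
    · have hl : l ≤ s := by omega
      rw [pvScanL]
      have : hi < h.getD (s + 1 - 1) 0 := by
        have := hcond s hl (by omega)
        simpa using this
      rw [if_pos ⟨by omega, this⟩]
      simpa using ih hl (fun m hm1 hm2 => hcond m hm1 (by omega))
    · have : l = s + 1 := by omega
      subst this
      rw [pvScanL]
      rcases hstop with h0 | hle
      · omega
      · rw [if_neg]
        rintro ⟨_, hc⟩
        simp only [Nat.add_sub_cancel] at hc
        exact absurd hle (not_le.2 hc)

-- scanR characterization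
lemma pvScanR_eq (h : List Int) (hi : Int) (r' : Nat)
    (hr : r' < h.length)
    (hstop : ¬(r' + 1 < h.length ∧ hi ≤ h.getD (r' + 1) 0)) :
    ∀ k s, s + k = r' → (∀ m, s < m → m ≤ r' → hi ≤ h.getD m 0) → pvScanR h hi s = r' := by
  intro k
  induction k with
  | zero =>
    intro s hs _
    have : s = r' := by omega
    subst this
    rw [pvScanR, if_neg hstop]
  | succ k ih =>
    intro s hs hcond
    rw [pvScanR]
    have h1 : s + 1 < h.length := by omega
    have h2 : hi ≤ h.getD (s + 1) 0 := hcond (s + 1) (by omega) (by omega)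
    rw [if_pos ⟨h1, h2⟩]
    exact ih (s + 1) (by omega) (fun m hm1 hm2 => hcond m (by omega) hm2)

-- gap property carried for each stack element against the element below it
def pvGapOK (h : List Int) : List Nat → Prop
  | [] => True
  | [j] => ∀ m, m < j → pvH h j < pvH h m
  | j :: r :: rest => (∀ m, r < m → m < j → pvH h j < pvH h m) ∧ pvGapOK h (r :: rest)

-- everything in [lo, idx) that was popped with a witness ≤ idx is strictly taller than bar idx
lemma pvGap2 (h : List Int) (idx lo : Nat)
    (hpop : ∀ j, lo ≤ j → j < idx → ∃ t, j < t ∧ t ≤ idx ∧ pvH h t < pvH h j) :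
    ∀ m, lo ≤ m → m < idx → pvH h idx < pvH h m := by
  have key : ∀ k, ∀ m, idx - m ≤ k → lo ≤ m → m < idx → pvH h idx < pvH h m := by
    intro k
    induction k with
    | zero => intro m hk _ hmi; omega
    | succ k ih =>
      intro m hk hlo hmi
      obtain ⟨t, hmt, htidx, hlt⟩ := hpop m hlo hmi
      rcases Nat.lt_or_ge t idx with ht | ht
      · have := ih t (by omega) (by omega) ht
        linarith
      · have : t = idx := by omega
        subst this
        exact hlt
  intro m hlo hmi
  exact key (idx - m) m le_rfl hlo hmi

-- the invariant of A's first loop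
def pvInv1 (h : List Int) (stack : List Nat) (idx : Nat) (result : Int) : Prop :=
  idx ≤ h.length ∧
  (idx :: stack).Pairwise (· > ·) ∧
  stack.Pairwise (fun a b => pvH h b ≤ pvH h a) ∧
  (∀ j ∈ stack, ∀ m, j < m → m < idx → pvH h j ≤ pvH h m) ∧
  (∀ j, j < idx → j ∉ stack → ∃ t, j < t ∧ t ≤ idx ∧ t < h.length ∧ pvH h t < pvH h j) ∧
  pvGapOK h stack ∧
  pvP h (fun j => j < idx ∧ j ∉ stack) result

-- the invariant of A's second loop (the popped-witness clause is no longer available)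
def pvInv2 (h : List Int) (stack : List Nat) (result : Int) : Prop :=
  (h.length :: stack).Pairwise (· > ·) ∧
  stack.Pairwise (fun a b => pvH h b ≤ pvH h a) ∧
  (∀ j ∈ stack, ∀ m, j < m → m < h.length → pvH h j ≤ pvH h m) ∧
  pvGapOK h stack ∧
  pvP h (fun j => j < h.length ∧ j ∉ stack) result

-- the expression A folds into result at a pop, as a function
def pvAVal (h : List Int) (idx top : Nat) (rest : List Nat) (result : Int) : Int :=
  match rest with
  | r :: _ =>
    if pvH h top ≠ 0 then
      max result (2 * (pvH h top + ((idx : Int) - (r : Int) - 1)) * (if pvH h top ≠ 0 then 1 else 0))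
    else
      max result (2 * (pvH h top + (idx : Int)) * (if pvH h top ≠ 0 then 1 else 0))
  | [] => max result (2 * (pvH h top + (idx : Int)) * (if pvH h top ≠ 0 then 1 else 0))

-- pop step: the value A records for the popped bar is pvVal of that bar
lemma pvPop_val (h : List Int) (idx top : Nat) (rest : List Nat) (result : Int)
    (htop : top < idx) (hidx : idx ≤ h.length)
    (hcond : idx = h.length ∨ pvH h idx < pvH h top)
    (hdesc : (top :: rest).Pairwise (· > ·))
    (hsort : (top :: rest).Pairwise (fun a b => pvH h b ≤ pvH h a))
    (hgap : pvGapOK h (top :: rest))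
    (hsurv : ∀ m, top < m → m < idx → pvH h top ≤ pvH h m) :
    pvAVal h idx top rest result = max result (pvVal h top) := by
  unfold pvAVal
  have hR : pvScanR h (pvH h top) top = idx - 1 := by
    apply pvScanR_eq h (pvH h top) (idx - 1) (by omega) ?_ (idx - 1 - top) top (by omega)
        (fun m hm1 hm2 => hsurv m hm1 (by omega))
    have hidx1 : idx - 1 + 1 = idx := by omega
    rcases hcond with rfl | hlt
    · rw [hidx1]; simp
    · rw [hidx1]
      rintro ⟨_, hle⟩
      exact absurd hle (not_le.2 hlt)
  have hcast : ((idx - 1 : Nat) : Int) = (idx : Int) - 1 := by omega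
  match rest with
  | [] =>
    have hL : pvScanL h (pvH h top) top = 0 := by
      apply pvScanL_eq h (pvH h top) 0 (Or.inl rfl) top (by omega)
      intro m _ hm2
      exact hgap m hm2
    by_cases h0 : pvH h top = 0
    · simp only [h0, pvVal]
      norm_num
    · simp only [pvVal, if_neg h0, hL, hR, hcast]
      norm_num
      ring_nf
      simp [h0]
  | r :: rest' =>
    have hrt : r < top := (List.pairwise_cons.1 hdesc).1 r List.mem_cons_self
    have hL : pvScanL h (pvH h top) top = r + 1 := by
      apply pvScanL_eq h (pvH h top) (r + 1) ?_ top (by omega)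
      · intro m hm1 hm2
        exact hgap.1 m (by omega) hm2
      · right
        simpa using (List.pairwise_cons.1 hsort).1 r List.mem_cons_self
    by_cases h0 : pvH h top = 0
    · simp only [h0, pvVal]
      norm_num
    · simp only [pvVal, if_neg h0, hL, hR, hcast]
      norm_num [h0]
      ring_nf

lemma pvGapOK_tail (h : List Int) (top : Nat) (rest : List Nat)
    (hg : pvGapOK h (top :: rest)) : pvGapOK h rest := by
  match rest with
  | [] => trivial
  | r :: rest' => exact hg.2

-- push step preserves the loop-1 invariant
lemma pvPush_inv (h : List Int) (stack : List Nat) (idx : Nat) (result : Int)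
    (hinv : pvInv1 h stack idx result) (hidx : idx < h.length)
    (hle : ∀ j ∈ stack, pvH h j ≤ pvH h idx) :
    pvInv1 h (idx :: stack) (idx + 1) result := by
  obtain ⟨hi1, hi2, hi3, hi4, hi5, hi6, hi7⟩ := hinv
  have hmem : ∀ j ∈ stack, j < idx := fun j hj => (List.pairwise_cons.1 hi2).1 j hj
  refine ⟨by omega, ?_, ?_, ?_, ?_, ?_, ?_⟩
  · refine List.pairwise_cons.2 ⟨?_, hi2⟩
    intro j hj
    rcases List.mem_cons.1 hj with rfl | hj
    · omega
    · have := hmem j hj; omega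
  · exact List.pairwise_cons.2 ⟨hle, hi3⟩
  · intro j hj m hm1 hm2
    rcases List.mem_cons.1 hj with rfl | hj
    · omega
    · rcases Nat.lt_or_ge m idx with hmi | hmi
      · exact hi4 j hj m hm1 hmi
      · have hm : m = idx := by omega
        rw [hm]
        exact hle j hj
  · intro j hj hjn
    have hjne : j ≠ idx := fun hc => hjn (by simp [hc])
    have hjn' : j ∉ stack := fun hc => hjn (List.mem_cons_of_mem _ hc)
    obtain ⟨t, ht1, ht2, ht3, ht4⟩ := hi5 j (by omega) hjn'
    exact ⟨t, ht1, by omega, ht3, ht4⟩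
  · match stack with
    | [] =>
      show ∀ m, m < idx → pvH h idx < pvH h m
      intro m hm
      refine pvGap2 h idx 0 ?_ m (Nat.zero_le m) hm
      intro j _ hj
      obtain ⟨t, ht1, ht2, _, ht4⟩ := hi5 j hj (by simp)
      exact ⟨t, ht1, ht2, ht4⟩
    | top :: rest =>
      refine ⟨?_, hi6⟩
      intro m hm1 hm2
      refine pvGap2 h idx (top + 1) ?_ m hm1 hm2
      intro j hj1 hj2
      have hjn : j ∉ top :: rest := by
        intro hc
        rcases List.mem_cons.1 hc with rfl | hc
        · omega
        · have := (List.pairwise_cons.1 (List.pairwise_cons.1 hi2).2).1 j hc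
          omega
      obtain ⟨t, ht1, ht2, _, ht4⟩ := hi5 j hj2 hjn
      exact ⟨t, ht1, ht2, ht4⟩
  · apply pvP_congr ?_ hi7
    intro j
    constructor
    · rintro ⟨hj1, hj2⟩
      refine ⟨by omega, ?_⟩
      intro hc
      rcases List.mem_cons.1 hc with rfl | hc
      · omega
      · exact hj2 hc
    · rintro ⟨hj1, hj2⟩
      have hjne : j ≠ idx := fun hc => hj2 (by simp [hc])
      exact ⟨by omega, fun hc => hj2 (List.mem_cons_of_mem _ hc)⟩

-- pop step preserves the loop-1 invariant
lemma pvPop_inv (h : List Int) (top : Nat) (rest : List Nat) (idx : Nat) (result : Int)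
    (hinv : pvInv1 h (top :: rest) idx result) (hidx : idx < h.length)
    (hlt : pvH h idx < pvH h top) :
    pvInv1 h rest idx (max result (pvVal h top)) := by
  obtain ⟨hi1, hi2, hi3, hi4, hi5, hi6, hi7⟩ := hinv
  have htop : top < idx := (List.pairwise_cons.1 hi2).1 top List.mem_cons_self
  have htr : ∀ j ∈ rest, j < top := fun j hj =>
    (List.pairwise_cons.1 (List.pairwise_cons.1 hi2).2).1 j hj
  refine ⟨hi1, ?_, (List.pairwise_cons.1 hi3).2, ?_, ?_, pvGapOK_tail h top rest hi6, ?_⟩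
  · exact hi2.sublist ((List.sublist_cons_self top rest).cons₂ idx)
  · exact fun j hj => hi4 j (List.mem_cons_of_mem _ hj)
  · intro j hj hjn
    by_cases hjt : j = top
    · subst hjt
      exact ⟨idx, htop, le_rfl, hidx, hlt⟩
    · obtain ⟨t, ht1, ht2, ht3, ht4⟩ := hi5 j hj (by
        intro hc
        rcases List.mem_cons.1 hc with rfl | hc
        · exact hjt rfl
        · exact hjn hc)
      exact ⟨t, ht1, ht2, ht3, ht4⟩
  · apply pvP_insert hi7
    intro j
    constructor
    · rintro ⟨hj1, hj2⟩
      by_cases hjt : j = top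
      · exact Or.inr hjt
      · exact Or.inl ⟨hj1, by
          intro hc
          rcases List.mem_cons.1 hc with rfl | hc
          · exact hjt rfl
          · exact hj2 hc⟩
    · rintro (⟨hj1, hj2⟩ | rfl)
      · exact ⟨hj1, fun hc => hj2 (List.mem_cons_of_mem _ hc)⟩
      · exact ⟨htop, fun hc => by have := htr j hc; omega⟩

lemma pvLoop1_spec (h : List Int) (stack : List Nat) (idx : Nat) (result : Int) :
    pvInv1 h stack idx result →
    pvInv1 h (pvLoop1 h stack idx result).1 h.length (pvLoop1 h stack idx result).2 := by
  fun_induction pvLoop1 h stack idx result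
  case case1 idx result hidx ih =>
    intro hinv
    exact ih (pvPush_inv h [] idx result hinv hidx (by simp))
  case case2 idx result hidx top rest hle ih =>
    intro hinv
    refine ih (pvPush_inv h (top :: rest) idx result hinv hidx ?_)
    intro j hj
    rcases List.mem_cons.1 hj with rfl | hj
    · exact hle
    · exact le_trans ((List.pairwise_cons.1 hinv.2.2.1).1 j hj) hle
  case case3 idx result hidx top rest hle result' ih =>
    intro hinv
    have hval0 : result' = pvAVal h idx top rest result := by cases rest <;> rfl
    have hval : pvAVal h idx top rest result = max result (pvVal h top) :=
      pvPop_val h idx top rest result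
        ((List.pairwise_cons.1 hinv.2.1).1 top List.mem_cons_self) (by omega)
        (Or.inr (not_le.1 hle)) (List.pairwise_cons.1 hinv.2.1).2 hinv.2.2.1
        hinv.2.2.2.2.2.1
        (fun m hm1 hm2 => hinv.2.2.2.1 top List.mem_cons_self m hm1 hm2)
    refine ih ?_
    rw [hval0, hval]
    exact pvPop_inv h top rest idx result hinv hidx (not_le.1 hle)
  case case4 stack idx result hidx =>
    intro hinv
    have hlen : idx = h.length := by have := hinv.1; omega
    exact hlen ▸ hinv

lemma pvLoop2_spec (h : List Int) (stack : List Nat) (result : Int) :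
    pvInv2 h stack result → pvP h (fun j => j < h.length) (pvLoop2 h stack result) := by
  induction stack generalizing result with
  | nil =>
    intro hinv
    rw [pvLoop2]
    apply pvP_congr ?_ hinv.2.2.2.2
    intro j
    constructor
    · rintro ⟨hj, _⟩; exact hj
    · intro hj; exact ⟨hj, by simp⟩
  | cons top rest ih =>
    intro hinv
    obtain ⟨hi2, hi3, hi4, hi6, hi7⟩ := hinv
    have htop : top < h.length := (List.pairwise_cons.1 hi2).1 top List.mem_cons_self
    have htr : ∀ j ∈ rest, j < top := fun j hj =>
      (List.pairwise_cons.1 (List.pairwise_cons.1 hi2).2).1 j hj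
    have hval : pvAVal h h.length top rest result = max result (pvVal h top) :=
      pvPop_val h h.length top rest result htop le_rfl (Or.inl rfl)
        (List.pairwise_cons.1 hi2).2 hi3 hi6
        (fun m hm1 hm2 => hi4 top List.mem_cons_self m hm1 hm2)
    have hstep : pvLoop2 h (top :: rest) result
        = pvLoop2 h rest (pvAVal h h.length top rest result) := by
      cases rest with
      | nil => rfl
      | cons r rest' =>
        rw [pvLoop2]
        congr 1
        unfold pvAVal
        by_cases h0 : pvH h top = 0 <;> simp [h0]
    rw [hstep, hval]
    apply ih
    refine ⟨hi2.sublist ((List.sublist_cons_self top rest).cons₂ h.length),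
      (List.pairwise_cons.1 hi3).2,
      fun j hj => hi4 j (List.mem_cons_of_mem _ hj),
      pvGapOK_tail h top rest hi6, ?_⟩
    apply pvP_insert hi7
    intro j
    constructor
    · rintro ⟨hj1, hj2⟩
      by_cases hjt : j = top
      · exact Or.inr hjt
      · exact Or.inl ⟨hj1, by
          intro hc
          rcases List.mem_cons.1 hc with rfl | hc
          · exact hjt rfl
          · exact hj2 hc⟩
    · rintro (⟨hj1, hj2⟩ | rfl)
      · exact ⟨hj1, fun hc => hj2 (List.mem_cons_of_mem _ hc)⟩
      · exact ⟨htop, fun hc => by have := htr j hc; omega⟩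

lemma pvAlt_spec (h : List Int) : pvP h (fun j => j < h.length) (max_perimeter_alt h) := by
  have key : ∀ k, pvP h (fun j => j < k) ((List.range k).foldl (fun best i =>
      let hi := h.getD i 0
      if hi = 0 then best
      else
        let l := pvScanL h hi i
        let r := pvScanR h hi i
        max best (2 * (hi + ((r : Int) - (l : Int) + 1)))) 0) := by
    intro k
    induction k with
    | zero =>
      exact ⟨le_rfl, fun j hj => absurd hj (Nat.not_lt_zero j), Or.inl rfl⟩
    | succ k ih =>
      rw [List.range_succ, List.foldl_append, List.foldl_cons, List.foldl_nil]
      simp only [] at ih ⊢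
      by_cases h0 : h.getD k 0 = 0
      · rw [if_pos h0]
        obtain ⟨nn, ub, wit⟩ := ih
        refine ⟨nn, ?_, ?_⟩
        · intro j hj
          by_cases hjk : j = k
          · rw [hjk]
            have hv0 : pvVal h k = 0 := by unfold pvVal pvH; rw [if_pos h0]
            rw [hv0]
            exact nn
          · exact ub j (by omega)
        · rcases wit with h' | ⟨j, hj, he⟩
          · exact Or.inl h'
          · exact Or.inr ⟨j, by omega, he⟩
      · rw [if_neg h0]
        have hv : (2 * (h.getD k 0 + ((pvScanR h (h.getD k 0) k : Int) - (pvScanL h (h.getD k 0) k : Int) + 1))) = pvVal h k := by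
          unfold pvVal pvH
          rw [if_neg h0]
        rw [hv]
        apply pvP_insert ih
        intro j
        omega
  exact key h.length

-- ===== VERDICT (by name: the statement is the Claim_ definition above) =====
theorem max_perimeter_spec : Claim_equal_max_perimeter := by
  intro h _
  unfold Spec_max_perimeter max_perimeter
  have h1 := pvLoop1_spec h [] 0 0 (by
    refine ⟨by omega, by simp, by simp, by simp, by omega, trivial, le_rfl, by omega, Or.inl rfl⟩)
  obtain ⟨_, hp2, hs2, hsv2, _, hg2, hP2⟩ := h1
  have h2 := pvLoop2_spec h _ _ ⟨hp2, hs2, hsv2, hg2, hP2⟩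
  exact pvP_unique h2 (pvAlt_spec h)
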